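-- pv_equiv track=rewrite | github.com/TigerAppsOrg/TigerPath | majors-and-certificates/scripts/verifier.py | _course_match
-- ===== SOURCE A (Python) =====
-- LANGs = [ # language departments
--     "ARA","BCS","SLA","CHI","CZE","FRE","GER","MOG","CLG","HEB","HIN","ITA",
--     "JPN","KOR","LAT","PER","PLS","POR","RUS","SPA","SWA","TUR","TWI","URD",
-- ]
--
-- def _course_match(course_name, pattern):
--     pattern = pattern.split(':')[0] # remove course title
--     pattern = ["".join(p.split()).upper() for p in pattern.split('/')] # split by '/' and
--     course = ["".join(c.split()).upper() for c in course_name.split('/')] # remove spaces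
--     for c in course:
--         for p in pattern:
--             if c == p: # exact name matched
--                 return True
--             if p[:4] == 'LANG' and c[:3] in LANGs: # language course
--                 if c[3:] == p[4:]: # course numbers match
--                     return True
--                 if (len(p)>4 and p[4] == '*'): # 'LANG*' or 'LANG***'
--                     return True
--                 if (len(c)>4 and len(p)>5 and
--                     p[5] == '*' and c[3:4] == p[4:5]): # 'LANG1*' or 'LANG1**'
--                     return True
--                 if (len(c)>5 and len(p)>6 and
--                     p[6] == '*' and c[3:5] == p[4:6]): # 'LANG12*'
--                     return True
--                 if (len(c)>6 and len(p)>7 and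
--                     p[7] == '*' and c[3:6] == p[4:7]): # 'LANG123*'
--                     return True
--             # non-language course
--             if (len(c)>3 and len(p)>3 and
--                     p[3] == '*' and c[:3] == p[:3]): # 'AAA*' or 'AAA***'
--                 return True
--             if (len(c)>4 and len(p)>4 and
--                     p[4] == '*' and c[:4] == p[:4]): # 'AAA1*' or 'AAA1**'
--                 return True
--             if (len(c)>5 and len(p)>5 and
--                     p[5] == '*' and c[:5] == p[:5]): # 'AAA12*'  Note: not currently in format spec
--                 return True
--             if (len(c)>6 and len(p)>6 and
--                     p[6] == '*' and c[:6] == p[:6]): # 'AAA123*' matches to 'AAA123C'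
--                 return True
--     return False
-- ===== SOURCE B (Python) =====
-- LANGs = [ # language departments
--     "ARA","BCS","SLA","CHI","CZE","FRE","GER","MOG","CLG","HEB","HIN","ITA",
--     "JPN","KOR","LAT","PER","PLS","POR","RUS","SPA","SWA","TUR","TWI","URD",
-- ]
--
-- def _expand(p):
--     """All concrete pattern strings a token p stands for: p itself, and for a
--     'LANG...' pattern its 24 per-department instances (plus the bare department
--     code for 'LANG*', which matches a department's courses unconditionally)."""
--     out = [p]
--     if p[:4] == 'LANG':
--         for lang in LANGs:
--             q = lang + p[4:]
--             out.append(q)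
--             if q[3:4] == '*':
--                 out.append(lang)
--     return out
--
-- def _course_match(course_name, pattern):
--     pats = ["".join(p.split()).upper() for p in pattern.split(':')[0].split('/')]
--     courses = ["".join(c.split()).upper() for c in course_name.split('/')]
--     expanded = [q for p in pats for q in _expand(p)]
--     # index the patterns once: exact strings, and (star position, prefix) keys
--     exact = set(expanded)
--     stars = set((s, q[:s]) for q in expanded
--                 for s in range(3, 7) if s < len(q) and q[s] == '*')
--     return any(c in exact or
--                any(s < len(c) and (s, c[:s]) in stars for s in range(3, 7))
--                for c in courses)
-- ===== Notes on version B (the rewrite author's own statement) =====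
-- stated objective: alternative
-- what changed: Instead of A's nested course-by-pattern loop testing ten positional branches per pair, B preprocesses the pattern tokens once into two hash indexes - an exact-string set (LANG patterns expanded into their 24 per-department instances, plus the bare department code for 'LANG*') and a set of (star position, prefix) keys - and then each course token is matched by O(1) set lookups, so the inner scan over patterns and all per-pair LANG branches disappear.
import Mathlib
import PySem

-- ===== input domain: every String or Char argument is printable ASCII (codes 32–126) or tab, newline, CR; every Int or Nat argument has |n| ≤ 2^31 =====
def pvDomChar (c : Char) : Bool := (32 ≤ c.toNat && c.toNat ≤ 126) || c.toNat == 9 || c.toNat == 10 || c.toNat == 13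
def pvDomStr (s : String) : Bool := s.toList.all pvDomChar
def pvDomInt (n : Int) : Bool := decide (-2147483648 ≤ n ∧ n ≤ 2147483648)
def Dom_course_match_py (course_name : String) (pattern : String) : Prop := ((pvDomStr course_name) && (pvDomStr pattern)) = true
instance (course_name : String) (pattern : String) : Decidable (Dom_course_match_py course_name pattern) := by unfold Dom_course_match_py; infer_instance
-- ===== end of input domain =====

-- B replaces A's nested course-by-pattern loop (ten positional branches per pair) by
-- two set indexes built once from the pattern tokens — an exact-string set (LANG
-- patterns expanded per department) and a set of (star position, prefix) keys — so each
-- course token is matched by set lookups (objective: alternative).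

-- ===== PORT A =====
-- LANGs (module constant), as lists of chars
def pvLANGs : List (List Char) :=
  ["ARA","BCS","SLA","CHI","CZE","FRE","GER","MOG","CLG","HEB","HIN","ITA",
   "JPN","KOR","LAT","PER","PLS","POR","RUS","SPA","SWA","TUR","TWI","URD"].map String.toList

-- the body of A's double loop: the ordered disjunction of all of A's `return True` conditions
def pvCondA (c p : List Char) : Bool :=
  (c == p) ||
  (((PySem.List.slice p none (some 4) == "LANG".toList) && pvLANGs.contains (PySem.List.slice c none (some 3))) &&
    ((PySem.List.slice c (some 3) none == PySem.List.slice p (some 4) none) ||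
     (decide ((4:Int) < PySem.List.len p) && (PySem.List.pyGetD p 4 ' ' == '*')) ||
     (decide ((4:Int) < PySem.List.len c) && decide ((5:Int) < PySem.List.len p) &&
        (PySem.List.pyGetD p 5 ' ' == '*') && (PySem.List.slice c (some 3) (some 4) == PySem.List.slice p (some 4) (some 5))) ||
     (decide ((5:Int) < PySem.List.len c) && decide ((6:Int) < PySem.List.len p) &&
        (PySem.List.pyGetD p 6 ' ' == '*') && (PySem.List.slice c (some 3) (some 5) == PySem.List.slice p (some 4) (some 6))) ||
     (decide ((6:Int) < PySem.List.len c) && decide ((7:Int) < PySem.List.len p) &&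
        (PySem.List.pyGetD p 7 ' ' == '*') && (PySem.List.slice c (some 3) (some 6) == PySem.List.slice p (some 4) (some 7))))) ||
  (decide ((3:Int) < PySem.List.len c) && decide ((3:Int) < PySem.List.len p) &&
     (PySem.List.pyGetD p 3 ' ' == '*') && (PySem.List.slice c none (some 3) == PySem.List.slice p none (some 3))) ||
  (decide ((4:Int) < PySem.List.len c) && decide ((4:Int) < PySem.List.len p) &&
     (PySem.List.pyGetD p 4 ' ' == '*') && (PySem.List.slice c none (some 4) == PySem.List.slice p none (some 4))) ||
  (decide ((5:Int) < PySem.List.len c) && decide ((5:Int) < PySem.List.len p) &&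
     (PySem.List.pyGetD p 5 ' ' == '*') && (PySem.List.slice c none (some 5) == PySem.List.slice p none (some 5))) ||
  (decide ((6:Int) < PySem.List.len c) && decide ((6:Int) < PySem.List.len p) &&
     (PySem.List.pyGetD p 6 ' ' == '*') && (PySem.List.slice c none (some 6) == PySem.List.slice p none (some 6)))

def course_match_py (course_name : String) (pattern : String) : Bool :=
  let pat0 := PySem.List.pyGetD (PySem.Chars.splitOn pattern.toList [':']) 0 []  -- pattern.split(':')[0]
  let pats := (PySem.Chars.splitOn pat0 ['/']).map
      (fun p => PySem.Chars.upper (PySem.Chars.join [] (PySem.Chars.split₀ p)))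
  let courses := (PySem.Chars.splitOn course_name.toList ['/']).map
      (fun t => PySem.Chars.upper (PySem.Chars.join [] (PySem.Chars.split₀ t)))
  courses.any (fun c => pats.any (fun p => pvCondA c p))

-- ===== PORT B =====
-- Source B's _expand: p itself, plus per-department instances of a 'LANG...' pattern
-- (and the bare department code for 'LANG*')
def pvExpand (p : List Char) : List (List Char) :=
  [p] ++
    (if PySem.List.slice p none (some 4) == "LANG".toList then
      pvLANGs.flatMap (fun lang =>
        let q := lang ++ PySem.List.slice p (some 4) none
        [q] ++ (if PySem.List.slice q (some 3) (some 4) == ['*'] then [lang] else []))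
    else [])

-- Source B's stars comprehension body (the list the set is built from)
def pvStarKeys (expanded : List (List Char)) : List (Int × List Char) :=
  expanded.flatMap (fun q =>
    ((PySem.List.pyRange 3 7 1).filter
        (fun s => decide (s < PySem.List.len q) && (PySem.List.pyGetD q s ' ' == '*'))).map
      (fun s => (s, PySem.List.slice q none (some s))))

def course_match_py_alt (course_name : String) (pattern : String) : Bool :=
  let pats := (PySem.Chars.splitOn (PySem.List.pyGetD (PySem.Chars.splitOn pattern.toList [':']) 0 []) ['/']).map
      (fun p => PySem.Chars.upper (PySem.Chars.join [] (PySem.Chars.split₀ p)))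
  let courses := (PySem.Chars.splitOn course_name.toList ['/']).map
      (fun t => PySem.Chars.upper (PySem.Chars.join [] (PySem.Chars.split₀ t)))
  let expanded := pats.flatMap pvExpand
  let exact : PySem.Set (List Char) := PySem.Set.ofList expanded
  let stars : PySem.Set (Int × List Char) := PySem.Set.ofList (pvStarKeys expanded)
  courses.any (fun c =>
    PySem.Set.contains exact c ||
      (PySem.List.pyRange 3 7 1).any (fun s =>
        decide (s < PySem.List.len c) && PySem.Set.contains stars (s, PySem.List.slice c none (some s))))

-- ===== PRECONDITION & SPEC =====
def Spec_course_match_py (course_name : String) (pattern : String) (out : Bool) : Prop := out = course_match_py_alt course_name pattern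
instance (course_name : String) (pattern : String) (out : Bool) : Decidable (Spec_course_match_py course_name pattern out) := by unfold Spec_course_match_py; infer_instance

-- ===== CLAIM (what is proved, stated in full; the proofs are below) =====
def Claim_equal_course_match_py : Prop := ∀ (course_name : String) (pattern : String), Dom_course_match_py course_name pattern → Spec_course_match_py course_name pattern (course_match_py course_name pattern)

-- ===== LEMMAS AND PROOFS =====

-- "positional wildcard at s matches": the proposition behind both programs' star rules
abbrev pvD (c q : List Char) (s : Nat) : Prop :=
  s < c.length ∧ s < q.length ∧ q[s]? = some '*' ∧ c.take s = q.take s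

theorem pv_take_one (l : List Char) : l.take 1 = ['*'] ↔ l[0]? = some '*' := by
  cases l <;> simp

-- every department code has three characters and is not 'LAN'
theorem pvLANGs_facts : ∀ l ∈ pvLANGs, l.length = 3 ∧ l ≠ ['L','A','N'] := by decide

-- A's generic star branch at position s, as a decide
theorem pv_gen_eq (c p : List Char) (si : Int) (s : Nat) (hsi : si = (s : Int)) :
    (decide (si < PySem.List.len c) && decide (si < PySem.List.len p) &&
     (PySem.List.pyGetD p si ' ' == '*') &&
     (PySem.List.slice c none (some si) == PySem.List.slice p none (some si))) =
    decide (pvD c p s) := by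
  subst hsi
  rw [Bool.eq_iff_iff, decide_eq_true_eq]
  simp only [PySem.List.len_eq, PySem.List.pyGetD_natCast, PySem.List.slice_to_natCast]
  by_cases hc : s < c.length <;> by_cases hp : s < p.length <;>
    simp [hc, hp, pvD, List.getD_eq_getElem?_getD]

-- A's exact-numbers test in the LANG branch
theorem pv_E_eq (c p : List Char) :
    (PySem.List.slice c (some 3) none == PySem.List.slice p (some 4) none) =
    decide (c.drop 3 = p.drop 4) := by
  rw [PySem.List.slice_from _ (by norm_num), PySem.List.slice_from _ (by norm_num)]
  simp [Bool.beq_eq_decide_eq]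

-- A's 'LANG*' test
theorem pv_L3_eq (p : List Char) :
    (decide ((4:Int) < PySem.List.len p) && (PySem.List.pyGetD p 4 ' ' == '*')) =
    decide (p[4]? = some '*') := by
  rw [Bool.eq_iff_iff, decide_eq_true_eq]
  simp only [PySem.List.len_eq, PySem.List.pyGetD_ofNat']
  by_cases hp : 4 < p.length <;>
    simp [hp, List.getD_eq_getElem?_getD]

-- A's LANG star branch at course position s (pattern position s+1), as a decide
theorem pv_lang_gen_eq (c p : List Char) (sc sp : Int) (s : Nat)
    (hsc : sc = (s : Int)) (hsp : sp = ((s+1 : Nat) : Int)) (h3 : 3 ≤ s) :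
    (decide (sc < PySem.List.len c) && decide (sp < PySem.List.len p) &&
     (PySem.List.pyGetD p sp ' ' == '*') &&
     (PySem.List.slice c (some 3) (some sc) == PySem.List.slice p (some 4) (some sp))) =
    decide (s < c.length ∧ s + 1 < p.length ∧ p[s+1]? = some '*' ∧
            (c.drop 3).take (s-3) = (p.drop 4).take (s-3)) := by
  subst hsc hsp
  rw [Bool.eq_iff_iff, decide_eq_true_eq]
  rw [PySem.List.slice_toNat c (by norm_num) (by positivity),
      PySem.List.slice_toNat p (by norm_num) (by positivity)]
  simp only [PySem.List.len_eq, PySem.List.pyGetD_natCast, Int.toNat_natCast,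
             Int.reduceToNat]
  rw [show s + 1 - 4 = s - 3 from by omega]
  by_cases hc : s < c.length <;> by_cases hp : s + 1 < p.length <;>
    (simp [hc, hp, List.getD_eq_getElem?_getD, Nat.cast_lt]; try omega)

-- pvD on a per-department expansion lang ++ p[4:] is A's LANG star rule at the shifted position
theorem pv_lang_bridge (c p lang : List Char) (s : Nat) (h3 : 3 ≤ s) (hl : lang.length = 3) :
    pvD c (lang ++ p.drop 4) s ↔
      (s < c.length ∧ s + 1 < p.length ∧ p[s+1]? = some '*' ∧
       c.take 3 = lang ∧ (c.drop 3).take (s-3) = (p.drop 4).take (s-3)) := by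
  have hlen2 : (lang ++ p.drop 4).length = 3 + (p.length - 4) := by simp [hl]
  have hidx : (lang ++ p.drop 4)[s]? = p[s+1]? := by
    rw [List.getElem?_append_right (by omega), hl, List.getElem?_drop]
    congr 1; omega
  have htc : c.take s = c.take 3 ++ (c.drop 3).take (s-3) := by
    conv_lhs => rw [show s = 3 + (s-3) by omega]
    exact List.take_add
  have htp : (lang ++ p.drop 4).take s = lang ++ (p.drop 4).take (s-3) := by
    rw [List.take_append, List.take_of_length_le (by omega), hl]
  unfold pvD
  rw [hidx, htc, htp, hlen2]
  constructor
  · rintro ⟨h1, h2, h3', h4⟩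
    have hlc : (c.take 3).length = lang.length := by
      rw [hl, List.length_take]; omega
    obtain ⟨he1, he2⟩ := List.append_inj h4 hlc
    exact ⟨h1, by omega, h3', he1, he2⟩
  · rintro ⟨h1, h2, h3', h4, h5⟩
    exact ⟨h1, by omega, h3', by rw [h4, h5]⟩

-- the elements of Source B's _expand(p)
theorem pv_mem_expand (x p : List Char) :
    x ∈ pvExpand p ↔ x = p ∨ (p.take 4 = ['L','A','N','G'] ∧ ∃ lang ∈ pvLANGs,
      (x = lang ++ p.drop 4 ∨ ((p.drop 4).take 1 = ['*'] ∧ x = lang))) := by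
  unfold pvExpand
  have e1 : PySem.List.slice p none (some 4) = p.take 4 := by
    rw [PySem.List.slice_to _ (by norm_num)]; simp
  have e4 : PySem.List.slice p (some 4) none = p.drop 4 := by
    rw [PySem.List.slice_from _ (by norm_num)]; simp
  have hq : ∀ lang ∈ pvLANGs,
      PySem.List.slice (lang ++ p.drop 4) (some 3) (some 4) = (p.drop 4).take 1 := by
    intro lang hlang
    obtain ⟨hl, -⟩ := pvLANGs_facts lang hlang
    rw [PySem.List.slice_toNat _ (by norm_num) (by norm_num)]
    have hdl : List.drop ((3:Int).toNat) (lang ++ p.drop 4) = p.drop 4 := by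
      rw [show ((3:Int).toNat) = lang.length from by rw [hl]; rfl]
      exact List.drop_left
    rw [hdl]
    simp
  by_cases hp : p.take 4 = ['L','A','N','G']
  · rw [if_pos (by simp [e1, hp])]
    simp only [e4, List.singleton_append, List.mem_cons, List.mem_flatMap, hp, true_and]
    refine or_congr Iff.rfl (exists_congr fun lang => and_congr_right fun hlang => ?_)
    rw [hq lang hlang]
    by_cases hst : (p.drop 4).take 1 = ['*']
    · simp [hst]
    · simp [hst]
  · rw [if_neg (by simp [e1, hp])]
    simp [hp]

-- the star-condition boolean of Source B's comprehension, as a decide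
theorem pv_cond_eq (q : List Char) (s : Nat) :
    (decide ((s:Int) < PySem.List.len q) && (PySem.List.pyGetD q (s:Int) ' ' == '*')) =
    decide (s < q.length ∧ q[s]? = some '*') := by
  rw [Bool.eq_iff_iff, decide_eq_true_eq]
  simp only [PySem.List.len_eq, PySem.List.pyGetD_natCast]
  by_cases hq : s < q.length <;>
    simp [hq, List.getD_eq_getElem?_getD]

-- the elements of Source B's stars index
theorem pv_mem_starKeys (E : List (List Char)) (k : Int × List Char) :
    k ∈ pvStarKeys E ↔ ∃ q ∈ E, ∃ s : Nat, 3 ≤ s ∧ s < 7 ∧ s < q.length ∧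
      q[s]? = some '*' ∧ k = ((s : Int), q.take s) := by
  unfold pvStarKeys
  simp only [List.mem_flatMap, List.mem_map, List.mem_filter, PySem.List.mem_pyRange_one]
  constructor
  · rintro ⟨q, hqE, sI, ⟨⟨h3, h7⟩, hcond⟩, hk⟩
    obtain ⟨s, rfl⟩ : ∃ s : Nat, sI = (s : Int) :=
      ⟨sI.toNat, (Int.toNat_of_nonneg (by omega)).symm⟩
    rw [pv_cond_eq, decide_eq_true_eq] at hcond
    refine ⟨q, hqE, s, by exact_mod_cast h3, by exact_mod_cast h7, hcond.1, hcond.2, ?_⟩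
    rw [← hk, PySem.List.slice_to_natCast]
  · rintro ⟨q, hqE, s, h3, h7, hlen, hstar, rfl⟩
    refine ⟨q, hqE, (s : Int), ⟨⟨by exact_mod_cast h3, by exact_mod_cast h7⟩, ?_⟩, ?_⟩
    · rw [pv_cond_eq, decide_eq_true_eq]; exact ⟨hlen, hstar⟩
    · rw [PySem.List.slice_to_natCast]

-- A's LANG-branch guard, as a decide
theorem pv_guard_eq (c p : List Char) :
    ((PySem.List.slice p none (some 4) == "LANG".toList) &&
      pvLANGs.contains (PySem.List.slice c none (some 3))) =
    decide (p.take 4 = ['L','A','N','G'] ∧ c.take 3 ∈ pvLANGs) := by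
  rw [Bool.eq_iff_iff]
  simp only [Bool.and_eq_true, decide_eq_true_eq, beq_iff_eq]
  rw [PySem.List.slice_to _ (by norm_num), PySem.List.slice_to _ (by norm_num),
      show "LANG".toList = ['L','A','N','G'] from rfl]
  simp

-- taking/dropping past a three-letter department code
theorem pv_take3_append (lang X : List Char) (hl : lang.length = 3) :
    (lang ++ X).take 3 = lang := by
  rw [List.take_append, List.take_of_length_le (by omega), hl]
  simp

theorem pv_drop3_append (lang X : List Char) (hl : lang.length = 3) :
    (lang ++ X).drop 3 = X := by
  rw [show (3:Nat) = lang.length from hl.symm]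
  exact List.drop_left

-- the per-pair equivalence: A's disjunction of branches = one hit in B's indexes for this pair
theorem pv_pair (c p : List Char) :
    pvCondA c p = true ↔
      (c ∈ pvExpand p ∨ ∃ s : Nat, 3 ≤ s ∧ s < 7 ∧ s < c.length ∧
        ∃ q ∈ pvExpand p, s < q.length ∧ q[s]? = some '*' ∧ c.take s = q.take s) := by
  unfold pvCondA
  rw [pv_gen_eq c p 3 3 (by norm_num), pv_gen_eq c p 4 4 (by norm_num),
      pv_gen_eq c p 5 5 (by norm_num), pv_gen_eq c p 6 6 (by norm_num),
      pv_E_eq, pv_L3_eq,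
      pv_lang_gen_eq c p 4 5 4 (by norm_num) (by norm_num) (by norm_num),
      pv_lang_gen_eq c p 5 6 5 (by norm_num) (by norm_num) (by norm_num),
      pv_lang_gen_eq c p 6 7 6 (by norm_num) (by norm_num) (by norm_num),
      pv_guard_eq]
  simp only [Bool.or_eq_true, Bool.and_eq_true, decide_eq_true_eq, beq_iff_eq, or_assoc]
  constructor
  · rintro (rfl | ⟨⟨hp4, hmem⟩, hbr⟩ | hD | hD | hD | hD)
    · exact Or.inl ((pv_mem_expand c c).mpr (Or.inl rfl))
    · obtain ⟨hl3, -⟩ := pvLANGs_facts _ hmem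
      have hl3' : (c.take 3).length = 3 := hl3
      rcases hbr with hE | hL3 | hG | hG | hG
      · -- exact numbers: c is the per-department expansion itself
        refine Or.inl ((pv_mem_expand c p).mpr (Or.inr ⟨hp4, c.take 3, hmem, Or.inl ?_⟩))
        rw [← hE, List.take_append_drop]
      · -- 'LANG*'
        have hp4len : 4 < p.length := (List.getElem?_eq_some_iff.mp hL3).1
        by_cases hc3 : 3 < c.length
        · -- star hit at position 3 on the expansion
          have hD3 : pvD c (c.take 3 ++ p.drop 4) 3 :=
            (pv_lang_bridge c p (c.take 3) 3 (by omega) hl3).mpr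
              ⟨hc3, by omega, hL3, rfl, by simp⟩
          exact Or.inr ⟨3, by omega, by omega, hD3.1,
            c.take 3 ++ p.drop 4,
            (pv_mem_expand _ p).mpr (Or.inr ⟨hp4, c.take 3, hmem, Or.inl rfl⟩),
            hD3.2.1, hD3.2.2.1, hD3.2.2.2⟩
        · -- short course name: the bare department code is in the exact index
          have hcc : c.take 3 = c := List.take_of_length_le (by omega)
          refine Or.inl ((pv_mem_expand c p).mpr (Or.inr ⟨hp4, c, hcc ▸ hmem, Or.inr ⟨?_, rfl⟩⟩))
          rw [pv_take_one, List.getElem?_drop]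
          exact hL3
      all_goals {
        -- LANG star branches at positions 4, 5, 6
        obtain ⟨h1, h2, h3', h4⟩ := hG
        have hD' : pvD c (c.take 3 ++ p.drop 4) _ :=
          (pv_lang_bridge c p (c.take 3) _ (by omega) hl3).mpr ⟨h1, h2, h3', rfl, h4⟩
        exact Or.inr ⟨_, by omega, by omega, hD'.1,
          c.take 3 ++ p.drop 4,
          (pv_mem_expand _ p).mpr (Or.inr ⟨hp4, c.take 3, hmem, Or.inl rfl⟩),
          hD'.2.1, hD'.2.2.1, hD'.2.2.2⟩
      }
    all_goals {
      -- A's generic star branches: star hits on the pattern itself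
      obtain ⟨h1, h2, h3', h4⟩ := hD
      exact Or.inr ⟨_, by omega, by omega, h1, p,
        (pv_mem_expand p p).mpr (Or.inl rfl), h2, h3', h4⟩
    }
  · rintro (hmem | ⟨s, h3, h7, hlc, q, hqmem, hql, hqs, hqt⟩)
    · rcases (pv_mem_expand c p).mp hmem with rfl | ⟨hp4, lang, hlang, hc⟩
      · exact Or.inl rfl
      · obtain ⟨hl, -⟩ := pvLANGs_facts _ hlang
        rcases hc with rfl | ⟨hst, rfl⟩
        · -- c is a per-department expansion: A's exact-numbers branch
          refine Or.inr (Or.inl ⟨⟨hp4, ?_⟩, Or.inl ?_⟩)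
          · rw [pv_take3_append _ _ hl]; exact hlang
          · rw [pv_drop3_append _ _ hl]
        · -- c is a bare department code: A's 'LANG*' branch
          refine Or.inr (Or.inl ⟨⟨hp4, ?_⟩, Or.inr (Or.inl ?_)⟩)
          · rw [List.take_of_length_le (by omega)]; exact hlang
          · rw [pv_take_one, List.getElem?_drop] at hst
            exact hst
    · rcases (pv_mem_expand q p).mp hqmem with rfl | ⟨hp4, lang, hlang, hq⟩
      · -- star hit on the pattern itself: A's generic star branches
        have hD : pvD c q s := ⟨hlc, hql, hqs, hqt⟩
        interval_cases s
        · exact Or.inr (Or.inr (Or.inl hD))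
        · exact Or.inr (Or.inr (Or.inr (Or.inl hD)))
        · exact Or.inr (Or.inr (Or.inr (Or.inr (Or.inl hD))))
        · exact Or.inr (Or.inr (Or.inr (Or.inr (Or.inr hD))))
      · obtain ⟨hl, -⟩ := pvLANGs_facts _ hlang
        rcases hq with rfl | ⟨-, rfl⟩
        · -- star hit on a per-department expansion: A's LANG star branches
          obtain ⟨h1, h2, h3', hc3, h5⟩ :=
            (pv_lang_bridge c p lang s h3 hl).mp ⟨hlc, hql, hqs, hqt⟩
          have hmem' : c.take 3 ∈ pvLANGs := hc3 ▸ hlang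
          refine Or.inr (Or.inl ⟨⟨hp4, hmem'⟩, ?_⟩)
          interval_cases s
          · exact Or.inr (Or.inl h3')
          · exact Or.inr (Or.inr (Or.inl ⟨h1, h2, h3', h5⟩))
          · exact Or.inr (Or.inr (Or.inr (Or.inl ⟨h1, h2, h3', h5⟩)))
          · exact Or.inr (Or.inr (Or.inr (Or.inr ⟨h1, h2, h3', h5⟩)))
        · -- a bare department code carries no star at position ≥ 3
          omega

-- the whole-list equivalence: A's inner loop over pats = B's lookups in the indexes over pats
theorem pv_any_eq (pats : List (List Char)) (c : List Char) :
    pats.any (fun p => pvCondA c p) =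
    (PySem.Set.contains (PySem.Set.ofList (pats.flatMap pvExpand)) c ||
      (PySem.List.pyRange 3 7 1).any (fun s =>
        decide (s < PySem.List.len c) &&
          PySem.Set.contains (PySem.Set.ofList (pvStarKeys (pats.flatMap pvExpand)))
            (s, PySem.List.slice c none (some s)))) := by
  rw [Bool.eq_iff_iff]
  simp only [List.any_eq_true, Bool.or_eq_true, Bool.and_eq_true, decide_eq_true_eq,
             PySem.Set.contains_iff, PySem.Set.mem_ofList, PySem.List.mem_pyRange_one,
             PySem.List.len_eq]
  constructor
  · rintro ⟨p, hp, hA⟩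
    rcases (pv_pair c p).mp hA with hmem | ⟨s, h3, h7, hlc, q, hq, hql, hqs, hqt⟩
    · exact Or.inl (List.mem_flatMap.mpr ⟨p, hp, hmem⟩)
    · refine Or.inr ⟨(s : Int), ⟨by exact_mod_cast h3, by exact_mod_cast h7⟩,
        by exact_mod_cast hlc, ?_⟩
      rw [(pv_mem_starKeys _ _)]
      refine ⟨q, List.mem_flatMap.mpr ⟨p, hp, hq⟩, s, h3, h7, hql, hqs, ?_⟩
      rw [PySem.List.slice_to_natCast, hqt]
  · rintro (hmem | ⟨sI, ⟨h3, h7⟩, hlc, hk⟩)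
    · obtain ⟨p, hp, hx⟩ := List.mem_flatMap.mp hmem
      exact ⟨p, hp, (pv_pair c p).mpr (Or.inl hx)⟩
    · obtain ⟨q, hqE, s, hs3, hs7, hql, hqs, hkey⟩ := (pv_mem_starKeys _ _).mp hk
      obtain ⟨hs, hsl⟩ := Prod.mk.injEq .. ▸ hkey
      obtain ⟨p, hp, hq⟩ := List.mem_flatMap.mp hqE
      refine ⟨p, hp, (pv_pair c p).mpr (Or.inr ⟨s, hs3, hs7, ?_, q, hq, hql, hqs, ?_⟩)⟩
      · rw [hs] at hlc; exact_mod_cast hlc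
      · rw [hs, PySem.List.slice_to_natCast] at hsl; exact hsl

-- ===== VERDICT (by name: the statement is the Claim_ definition above) =====
theorem course_match_py_spec : Claim_equal_course_match_py := by
  intro course_name pattern _
  unfold Spec_course_match_py course_match_py course_match_py_alt
  simp only [pv_any_eq]
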